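-- pv_equiv track=rewrite | github.com/NguyenHung952/100-Days-of-Python | Day56/Day56.py | encode_hamming
-- ===== SOURCE A (Python) =====
-- def is_binary(data):
--
--     return all(bit in "01" for bit in data)
--
-- def calculate_parity_bits(data):
--
--     m = len(data)
--
--     r = 0
--
--     while (2 ** r) < (m + r + 1):
--
--         r += 1
--
--     return r
--
-- def encode_hamming(data):
--
--     if not is_binary(data):
--
--         return None
--
--     data = list(data)
--
--     m = len(data)
--
--     r = calculate_parity_bits(data)
--
--     total_length = m + r
--
--     encoded = ['0'] * total_length
--
--     # ========================================================
--     # CHÈN DATA BIT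
--     # ========================================================
--
--     j = 0
--
--     for i in range(1, total_length + 1):
--
--         if (i & (i - 1)) != 0:
--
--             encoded[i - 1] = data[j]
--
--             j += 1
--
--     # ========================================================
--     # TÍNH PARITY
--     # ========================================================
--
--     for i in range(r):
--
--         parity_position = 2 ** i
--
--         parity = 0
--
--         for j in range(1, total_length + 1):
--
--             if j & parity_position:
--
--                 parity ^= int(encoded[j - 1])
--
--         encoded[parity_position - 1] = str(parity)
--
--     return ''.join(encoded)
-- ===== SOURCE B (Python) =====
-- def encode_hamming(data):
--     if any(bit not in "01" for bit in data):
--         return None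
--     m = len(data)
--     r = 0
--     while (2 ** r) < (m + r + 1):
--         r += 1
--     total = m + r
--     # one forward pass: place each data bit and scatter it into the r parity accumulators
--     cells = []
--     acc = [0] * r
--     j = 0
--     for p in range(1, total + 1):
--         if p & (p - 1):
--             c = data[j]
--             j += 1
--             cells.append(c)
--             if c == '1':
--                 for i in range(r):
--                     if (p >> i) & 1:
--                         acc[i] ^= 1
--         else:
--             cells.append(None)
--     for i in range(r):
--         cells[2 ** i - 1] = str(acc[i])
--     return ''.join(cells)
-- ===== Notes on version B (the rewrite author's own statement) =====
-- stated objective: alternative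
-- what changed: A computes each parity bit with its own full gather scan over the encoded word (r nested scans); B makes a single forward pass that places each data bit and scatters it into an array of r parity accumulators, then writes the accumulators into the power-of-two slots.
import Mathlib
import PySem

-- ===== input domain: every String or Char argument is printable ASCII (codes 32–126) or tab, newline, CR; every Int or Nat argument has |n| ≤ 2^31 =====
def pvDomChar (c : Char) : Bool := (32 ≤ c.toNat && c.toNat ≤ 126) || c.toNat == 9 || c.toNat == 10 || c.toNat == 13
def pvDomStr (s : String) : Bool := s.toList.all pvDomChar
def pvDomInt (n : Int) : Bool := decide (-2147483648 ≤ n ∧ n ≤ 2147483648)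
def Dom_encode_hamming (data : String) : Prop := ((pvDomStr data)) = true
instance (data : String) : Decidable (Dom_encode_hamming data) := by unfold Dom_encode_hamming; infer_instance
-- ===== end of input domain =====

-- B replaces A's per-parity gather scans (one full scan of the encoded word per parity bit)
-- by a single forward pass that scatters each data bit into an array of parity accumulators
-- (objective: alternative decomposition). Return-value equivalence only.

-- ===== PORT A =====

-- bound used only for termination of the while-loop port
theorem pv_two_mul_le : ∀ r : Nat, 2 * r ≤ 2 ^ r + 1
  | 0 => by decide
  | 1 => by decide
  | (n + 2) => by
      have ih := pv_two_mul_le (n + 1)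
      have h2 : 2 ≤ 2 ^ (n + 1) := by
        calc 2 = 2 ^ 1 := rfl
        _ ≤ 2 ^ (n + 1) := Nat.pow_le_pow_right (by decide) (by omega)
      have hp : 2 ^ (n + 2) = 2 ^ (n + 1) * 2 := pow_succ 2 (n + 1)
      omega

-- while (2 ** r) < (m + r + 1): r += 1
def pvCalcR (m r : Nat) : Nat :=
  if 2 ^ r < m + r + 1 then pvCalcR m (r + 1) else r
termination_by m + 2 - r
decreasing_by
  have := pv_two_mul_le r
  omega

def is_binary (data : List Char) : Bool := data.all (fun bit => bit == '0' || bit == '1')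

def calculate_parity_bits (data : List Char) : Nat := pvCalcR data.length 0

-- int(c) where c is always '0' or '1' (exact on the values reached)
def pvBitVal (c : Char) : Nat := if c == '1' then 1 else 0
-- str(n) where n is always 0 or 1 (exact on the values reached)
def pvStrBit (n : Nat) : Char := if n == 1 then '1' else '0'

-- for i in range(1, total+1) is ported as List.range total with position i = k+1;
-- data[j] is ported as getD (j never leaves range on reachable states)
def encode_hamming (data : String) : Option String :=
  if !is_binary data.toList then none
  else
    let dataL := data.toList
    let m := dataL.length
    let r := calculate_parity_bits dataL
    let total := m + r
    let st := (List.range total).foldl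
      (fun (st : List Char × Nat) k =>
        if (k + 1) &&& k ≠ 0 then (st.1.set k (dataL.getD st.2 '0'), st.2 + 1) else st)
      (List.replicate total '0', 0)
    let encoded := (List.range r).foldl
      (fun enc i =>
        let pp := 2 ^ i
        let parity := (List.range total).foldl
          (fun par k => if (k + 1) &&& pp ≠ 0 then par ^^^ pvBitVal (enc.getD k '0') else par) 0
        enc.set (pp - 1) (pvStrBit parity)) st.1
    some (String.ofList encoded)

-- ===== PORT B =====

-- single pass over positions 1..total: append each cell, scatter '1' data bits
-- into the parity accumulators acc; then write the accumulators into the 2^i slots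
def encode_hamming_alt (data : String) : Option String :=
  if data.toList.any (fun bit => !(bit == '0' || bit == '1')) then none
  else
    let dataL := data.toList
    let m := dataL.length
    let r := pvCalcR m 0
    let total := m + r
    let st := (List.range total).foldl
      (fun (st : List (Option Char) × List Nat × Nat) k =>
        if (k + 1) &&& k ≠ 0 then
          let c := dataL.getD st.2.2 '0'
          let acc := if c == '1' then
              (List.range r).foldl
                (fun a i => if ((k + 1) >>> i) &&& 1 ≠ 0 then a.set i (a.getD i 0 ^^^ 1) else a)
                st.2.1
            else st.2.1
          (st.1 ++ [some c], acc, st.2.2 + 1)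
        else (st.1 ++ [none], st.2.1, st.2.2))
      ([], List.replicate r 0, 0)
    let cells := (List.range r).foldl
      (fun cs i => cs.set (2 ^ i - 1) (some (pvStrBit (st.2.1.getD i 0)))) st.1
    -- ''.join(cells): every None placeholder has been overwritten
    some (String.ofList (cells.map (fun o => o.getD '0')))

-- ===== PRECONDITION & SPEC =====
def Spec_encode_hamming (data : String) (out : Option String) : Prop := out = encode_hamming_alt data
instance (data : String) (out : Option String) : Decidable (Spec_encode_hamming data out) := by unfold Spec_encode_hamming; infer_instance

-- ===== CLAIM (what is proved, stated in full; the proofs are below) =====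
def Claim_equal_encode_hamming : Prop := ∀ (data : String), Dom_encode_hamming data → Spec_encode_hamming data (encode_hamming data)

-- ===== LEMMAS AND PROOFS =====

-- 0-based cell index k holds a data bit iff position k+1 is not a power of two
def pvIsData (k : Nat) : Bool := (k + 1) &&& k ≠ 0

-- number of data cells among indices < n
def pvCnt : Nat → Nat
  | 0 => 0
  | n + 1 => pvCnt n + (if pvIsData n then 1 else 0)

-- the character placed in cell k before parities are written
def pvCell (dataL : List Char) (k : Nat) : Char :=
  if pvIsData k then dataL.getD (pvCnt k) '0' else '0'

-- parity accumulator i after scanning cells < n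
def pvPar (dataL : List Char) (i : Nat) : Nat → Nat
  | 0 => 0
  | n + 1 => pvPar dataL i n ^^^
      (if pvIsData n && Nat.testBit (n + 1) i && (pvCell dataL n == '1') then 1 else 0)

-- encoded word after the first i parity bits are written
def pvStage (dataL : List Char) (total : Nat) : Nat → List Char
  | 0 => (List.range total).map (pvCell dataL)
  | i + 1 => (pvStage dataL total i).set (2 ^ i - 1) (pvStrBit (pvPar dataL i total))

-- set on a map-over-range list, as a map
theorem pv_set_map_range {α : Type} (f : Nat → α) (total n : Nat) (v : α) (hn : n < total) :
    ((List.range total).map f).set n v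
      = (List.range total).map (fun k => if k = n then v else f k) := by
  apply List.ext_getElem
  · simp
  · intro i h1 h2
    simp only [List.getElem_set, List.getElem_map, List.getElem_range]
    rcases eq_or_ne i n with h | h
    · simp [h]
    · simp [h, Ne.symm h]

-- A's placement loop, characterised
theorem pv_placeA (dataL : List Char) (total : Nat) :
    ∀ n, n ≤ total →
    (List.range n).foldl
      (fun (st : List Char × Nat) k =>
        if (k + 1) &&& k ≠ 0 then (st.1.set k (dataL.getD st.2 '0'), st.2 + 1) else st)
      (List.replicate total '0', 0)
    = ((List.range total).map (fun k => if k < n then pvCell dataL k else '0'), pvCnt n) := by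
  intro n hn
  induction n with
  | zero =>
      simp [pvCnt, List.map_const']
  | succ n ih =>
      rw [List.range_succ, List.foldl_append, ih (by omega)]
      simp only [List.foldl_cons, List.foldl_nil]
      by_cases hd : (n + 1) &&& n ≠ 0
      · rw [if_pos hd, pv_set_map_range _ _ _ _ (by omega)]
        have hcell : pvCell dataL n = dataL.getD (pvCnt n) '0' := by
          simp [pvCell, pvIsData, hd]
        simp only [Prod.mk.injEq]
        refine ⟨?_, ?_⟩
        · apply List.map_congr_left
          intro k hk
          rcases eq_or_ne k n with h | h
          · simp [h, hcell]
          · rw [if_neg h]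
            split_ifs with h1 h2
            · rfl
            · omega
            · omega
            · rfl
        · simp [pvCnt, pvIsData, hd]
      · rw [if_neg hd]
        simp only [Prod.mk.injEq]
        refine ⟨?_, ?_⟩
        · apply List.map_congr_left
          intro k hk
          rcases eq_or_ne k n with h | h
          · subst h
            simp [pvCell, pvIsData, hd]
          · split_ifs with h1 h2
            · rfl
            · omega
            · omega
            · rfl
        · simp [pvCnt, pvIsData, hd]

-- B's scatter of one '1' bit into the accumulators, characterised
theorem pv_innerB (r p : Nat) (g : Nat → Nat) :
    ∀ s, s ≤ r →
    (List.range s).foldl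
      (fun a i => if (p >>> i) &&& 1 ≠ 0 then a.set i (a.getD i 0 ^^^ 1) else a)
      ((List.range r).map g)
    = (List.range r).map (fun i => if i < s ∧ Nat.testBit p i then g i ^^^ 1 else g i) := by
  intro s hs
  induction s with
  | zero =>
      simp only [List.range_zero, List.foldl_nil]
      apply List.map_congr_left
      intro i hi
      simp
  | succ s ih =>
      rw [List.range_succ, List.foldl_append, ih (by omega)]
      simp only [List.foldl_cons, List.foldl_nil]
      have hbit : ((p >>> s) &&& 1 ≠ 0) ↔ (Nat.testBit p s = true) := by
        simp [Nat.testBit, Nat.and_comm]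
      by_cases hb : Nat.testBit p s
      · rw [if_pos (hbit.mpr hb), PySem.List.getD_map_range _ _ _ _ (by omega),
          pv_set_map_range _ _ _ _ (by omega)]
        apply List.map_congr_left
        intro i hi
        rcases eq_or_ne i s with h | h
        · simp [h, hb]
        · rw [if_neg h]
          by_cases hib : Nat.testBit p i
          · simp only [hib, and_true]
            split_ifs <;> first | rfl | omega
          · simp [hib]
      · rw [if_neg (fun hc => hb (hbit.mp hc))]
        apply List.map_congr_left
        intro i hi
        rcases eq_or_ne i s with h | h
        · subst h
          simp [hb]
        · by_cases hib : Nat.testBit p i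
          · simp only [hib, and_true]
            split_ifs <;> first | rfl | omega
          · simp [hib]

-- B's placement/scatter loop, characterised
theorem pv_placeB (dataL : List Char) (total r : Nat) :
    ∀ n, n ≤ total →
    (List.range n).foldl
      (fun (st : List (Option Char) × List Nat × Nat) k =>
        if (k + 1) &&& k ≠ 0 then
          (st.1 ++ [some (dataL.getD st.2.2 '0')],
           if (dataL.getD st.2.2 '0') == '1' then
              (List.range r).foldl
                (fun a i => if ((k + 1) >>> i) &&& 1 ≠ 0 then a.set i (a.getD i 0 ^^^ 1) else a)
                st.2.1
            else st.2.1,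
           st.2.2 + 1)
        else (st.1 ++ [none], st.2.1, st.2.2))
      ([], List.replicate r 0, 0)
    = ((List.range n).map (fun k => if pvIsData k then some (pvCell dataL k) else none),
       (List.range r).map (fun i => pvPar dataL i n), pvCnt n) := by
  intro n hn
  induction n with
  | zero =>
      simp [pvPar, pvCnt, List.map_const']
  | succ n ih =>
      rw [List.range_succ, List.foldl_append, ih (by omega)]
      simp only [List.foldl_cons, List.foldl_nil]
      by_cases hd : (n + 1) &&& n ≠ 0
      · have hdb : pvIsData n = true := by simp [pvIsData, hd]
        have hcell : pvCell dataL n = dataL.getD (pvCnt n) '0' := by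
          simp [pvCell, hdb]
        rw [if_pos hd]
        simp only [Prod.mk.injEq]
        refine ⟨?_, ?_, ?_⟩
        · rw [List.map_append]
          simp [hdb, hcell]
        · by_cases hch : (dataL.getD (pvCnt n) '0') == '1'
          · rw [if_pos hch, pv_innerB r (n + 1) (fun i => pvPar dataL i n) r le_rfl]
            apply List.map_congr_left
            intro i hi
            have hir : i < r := List.mem_range.mp hi
            have hcc : (pvCell dataL n == '1') = true := by rw [hcell]; exact hch
            by_cases hib : Nat.testBit (n + 1) i
            · simp [pvPar, hib, hir, hdb, hcc]
            · simp [pvPar, hib, hir]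
          · rw [if_neg hch]
            apply List.map_congr_left
            intro i hi
            have hcc : (pvCell dataL n == '1') = false := by
              rw [hcell]; exact Bool.eq_false_iff.mpr hch
            simp [pvPar, hcc]
        · simp [pvCnt, hdb]
      · have hd0 : (n + 1) &&& n = 0 := not_not.mp hd
        have hdb : pvIsData n = false := by simp [pvIsData, hd0]
        rw [if_neg hd]
        simp only [Prod.mk.injEq]
        refine ⟨?_, ?_, ?_⟩
        · rw [List.map_append]
          simp [hdb]
        · apply List.map_congr_left
          intro i hi
          simp [pvPar, hdb]
        · simp [pvCnt, hdb]

theorem pv_getD_set_ne {α : Type} (l : List α) (n k : Nat) (a d : α) (h : n ≠ k) :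
    (l.set n a).getD k d = l.getD k d := by
  simp [List.getD, List.getElem?_set_ne h]

-- cells not yet overwritten by a parity bit still hold their placed character
theorem pv_stage_getD (dataL : List Char) (total : Nat) :
    ∀ i k, k < total → (∀ t, t < i → k ≠ 2 ^ t - 1) →
    (pvStage dataL total i).getD k '0' = pvCell dataL k := by
  intro i
  induction i with
  | zero =>
      intro k hk _
      simp only [pvStage]
      exact PySem.List.getD_map_range _ _ _ _ hk
  | succ i ih =>
      intro k hk hne
      simp only [pvStage]
      rw [pv_getD_set_ne _ _ _ _ _ (fun h => (hne i (by omega)) h.symm)]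
      exact ih k hk (fun t ht => hne t (by omega))

-- A's gather scan for parity i equals the scatter accumulator pvPar
theorem pv_gather (dataL : List Char) (i total : Nat) (enc : List Char)
    (henc : ∀ k, k < total → Nat.testBit (k + 1) i →
      pvBitVal (enc.getD k '0') = (if pvIsData k && (pvCell dataL k == '1') then 1 else 0)) :
    ∀ n, n ≤ total → ∀ a,
    (List.range n).foldl
      (fun par k => if (k + 1) &&& 2 ^ i ≠ 0 then par ^^^ pvBitVal (enc.getD k '0') else par) a
    = a ^^^ pvPar dataL i n := by
  intro n hn
  induction n with
  | zero => intro a; simp [pvPar]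
  | succ n ih =>
      intro a
      rw [List.range_succ, List.foldl_append, ih (by omega)]
      simp only [List.foldl_cons, List.foldl_nil]
      have hbit : ((n + 1) &&& 2 ^ i ≠ 0) ↔ (Nat.testBit (n + 1) i = true) := by
        simp [Nat.and_two_pow]
      by_cases hb : Nat.testBit (n + 1) i
      · rw [if_pos (hbit.mpr hb), henc n (by omega) hb, Nat.xor_assoc]
        have : pvPar dataL i (n + 1)
            = pvPar dataL i n ^^^ (if pvIsData n && (pvCell dataL n == '1') then 1 else 0) := by
          simp [pvPar, hb]
        rw [this]
      · rw [if_neg (fun hc => hb (hbit.mp hc))]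
        have : pvPar dataL i (n + 1) = pvPar dataL i n := by
          simp [pvPar, hb]
        rw [this]

-- the stage-i word satisfies pv_gather's hypothesis for parity i
theorem pv_stage_hyp (dataL : List Char) (total i : Nat) :
    ∀ k, k < total → Nat.testBit (k + 1) i →
      pvBitVal ((pvStage dataL total i).getD k '0')
        = (if pvIsData k && (pvCell dataL k == '1') then 1 else 0) := by
  intro k hk htb
  by_cases hex : ∃ t, t < i ∧ k = 2 ^ t - 1
  · obtain ⟨t, ht, hkt⟩ := hex
    exfalso
    have h1 : 1 ≤ 2 ^ t := Nat.one_le_two_pow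
    have hk1 : k + 1 = 2 ^ t := by omega
    rw [hk1] at htb
    have hti : t ≠ i := Nat.ne_of_lt ht
    simp [hti] at htb
  · have hne : ∀ t, t < i → k ≠ 2 ^ t - 1 := by
      intro t ht hkt
      exact hex ⟨t, ht, hkt⟩
    rw [pv_stage_getD dataL total i k hk hne]
    by_cases hd : pvIsData k
    · simp only [pvCell, hd, if_true, Bool.true_and, pvBitVal]
    · have h0 : (('0' : Char) == '1') = false := by decide
      simp [pvCell, hd, pvBitVal, h0]

-- A's parity loop builds exactly the pvStage words
theorem pv_outerA (dataL : List Char) (total : Nat) :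
    ∀ i, (List.range i).foldl
      (fun enc t =>
        enc.set (2 ^ t - 1) (pvStrBit ((List.range total).foldl
          (fun par k => if (k + 1) &&& 2 ^ t ≠ 0 then par ^^^ pvBitVal (enc.getD k '0') else par) 0)))
      (pvStage dataL total 0)
    = pvStage dataL total i := by
  intro i
  induction i with
  | zero => simp
  | succ i ih =>
      rw [List.range_succ, List.foldl_append, ih]
      simp only [List.foldl_cons, List.foldl_nil]
      rw [pv_gather dataL i total (pvStage dataL total i) (pv_stage_hyp dataL total i) total le_rfl 0]
      rw [Nat.zero_xor]
      rfl

-- B's final write-back, seen through the Option layer, also builds pvStage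
theorem pv_outerB (dataL : List Char) (total : Nat) :
    ∀ i,
    (((List.range i).foldl
        (fun cs t => cs.set (2 ^ t - 1) (some (pvStrBit (pvPar dataL t total))))
        ((List.range total).map (fun k => if pvIsData k then some (pvCell dataL k) else none))).map
      (fun o => o.getD '0'))
    = pvStage dataL total i := by
  intro i
  induction i with
  | zero =>
      simp only [List.range_zero, List.foldl_nil, List.map_map, pvStage]
      apply List.map_congr_left
      intro k hk
      by_cases hd : pvIsData k
      · simp [pvCell, hd]
      · simp [pvCell, hd]
  | succ i ih =>
      rw [List.range_succ, List.foldl_append]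
      simp only [List.foldl_cons, List.foldl_nil]
      rw [List.map_set, ih]
      rfl

-- the same, with the accumulator still read back through its list
theorem pv_outerB' (dataL : List Char) (total r : Nat) :
    (((List.range r).foldl
        (fun cs i => cs.set (2 ^ i - 1) (some (pvStrBit (((List.range r).map
            (fun i => pvPar dataL i total)).getD i 0))))
        ((List.range total).map (fun k => if pvIsData k then some (pvCell dataL k) else none))).map
      (fun o => o.getD '0'))
    = pvStage dataL total r := by
  rw [PySem.List.foldl_congr_mem _ _
    (fun cs t => cs.set (2 ^ t - 1) (some (pvStrBit (pvPar dataL t total)))) _ ?_]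
  · exact pv_outerB dataL total r
  · intro cs t ht
    rw [PySem.List.getD_map_range _ _ _ _ (List.mem_range.mp ht)]

theorem encode_hamming_spec : Claim_equal_encode_hamming := by
  intro data _
  unfold Spec_encode_hamming
  have hcond : (!is_binary data.toList)
      = data.toList.any (fun bit => !(bit == '0' || bit == '1')) := by
    simp [is_binary, List.all_eq_not_any_not]
  simp only [encode_hamming, encode_hamming_alt, calculate_parity_bits, hcond]
  by_cases hbin : data.toList.any (fun bit => !(bit == '0' || bit == '1')) = true
  · rw [if_pos hbin, if_pos hbin]
  · rw [if_neg hbin, if_neg hbin]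
    rw [pv_placeA data.toList (data.toList.length + pvCalcR data.toList.length 0) _ le_rfl]
    rw [pv_placeB data.toList (data.toList.length + pvCalcR data.toList.length 0)
      (pvCalcR data.toList.length 0) _ le_rfl]
    dsimp only
    have hst0 : (List.range (data.toList.length + pvCalcR data.toList.length 0)).map
        (fun k => if k < data.toList.length + pvCalcR data.toList.length 0
          then pvCell data.toList k else '0')
        = pvStage data.toList (data.toList.length + pvCalcR data.toList.length 0) 0 := by
      simp only [pvStage]
      apply List.map_congr_left
      intro k hk
      rw [if_pos (List.mem_range.mp hk)]
    rw [hst0, pv_outerA data.toList (data.toList.length + pvCalcR data.toList.length 0)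
      (pvCalcR data.toList.length 0)]
    rw [pv_outerB' data.toList (data.toList.length + pvCalcR data.toList.length 0)
      (pvCalcR data.toList.length 0)]
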